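-- pv_equiv track=rewrite | github.com/alpylmz/ChessMate | src/chessmate/scripts/vision/side_vision.py | CalculateDiff2
-- ===== SOURCE A (Python) =====
-- def CalculateDiff2(ret , diff2):
--
--     end = True
--     while end:
--         end = False
--         for i in ret:
--             if i + 8 in ret and diff2[i+8] > diff2[i]:
--                 ret.remove(i)
--                 end = True
--                 break
--     return ret
-- ===== SOURCE B (Python) =====
-- def CalculateDiff2(ret, diff2):
--     # One left-to-right pass with a multiplicity map of the still-present
--     # elements: removing an element never makes an earlier element removable,
--     # so A's repeated restart-scans collapse into a single pass.
--     cnt = {}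
--     for i in ret:
--         cnt[i] = cnt.get(i, 0) + 1
--     out = []
--     for i in ret:
--         if cnt.get(i + 8, 0) > 0 and diff2[i + 8] > diff2[i]:
--             cnt[i] -= 1
--         else:
--             out.append(i)
--     return out
-- ===== Notes on version B (the rewrite author's own statement) =====
-- stated objective: faster
-- what changed: A's restart-the-scan-after-every-removal fixpoint loop (membership tested by linear 'in ret') is replaced by a single left-to-right pass over ret with a multiplicity dict of the still-present elements; this is exact because the removal condition is antitone (removals only disable, never enable, earlier candidates). Pre_ excludes inputs where some i and i+8 are both in ret with an out-of-range index (Python raises IndexError there); in the rare corner where such an i+8 is removed before i is ever tested, both A and B still return the same value.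
import Mathlib
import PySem

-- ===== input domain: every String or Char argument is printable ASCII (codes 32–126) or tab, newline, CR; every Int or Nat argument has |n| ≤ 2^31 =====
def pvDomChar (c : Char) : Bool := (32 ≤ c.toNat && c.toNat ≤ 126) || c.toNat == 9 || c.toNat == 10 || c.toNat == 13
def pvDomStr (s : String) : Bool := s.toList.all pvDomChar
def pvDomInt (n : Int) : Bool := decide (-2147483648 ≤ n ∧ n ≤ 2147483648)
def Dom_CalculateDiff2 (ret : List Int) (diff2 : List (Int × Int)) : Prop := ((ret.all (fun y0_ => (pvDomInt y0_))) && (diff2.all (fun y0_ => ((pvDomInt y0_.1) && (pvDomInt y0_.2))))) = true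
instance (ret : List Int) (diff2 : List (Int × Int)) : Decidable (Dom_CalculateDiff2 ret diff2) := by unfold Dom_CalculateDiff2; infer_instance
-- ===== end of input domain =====

-- B replaces A's restart-after-every-removal fixpoint scan by one left-to-right pass with a
-- multiplicity dict of the still-present elements (removals never enable earlier candidates).
-- A mutates its argument `ret` in place (list.remove); the equivalence proved here is about the
-- RETURN value only — B leaves `ret` untouched.

-- ===== PORT A =====

-- Python tuple comparison diff2[i+8] > diff2[i] (lexicographic on the Int pair)
def pvPairGt (x y : Int × Int) : Bool := decide (x.1 > y.1) || (x.1 == y.1 && decide (x.2 > y.2))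

-- diff2[i+8] > diff2[i] with Python indexing; `none` (IndexError) is excluded by Pre_ below
def pvGtB (diff2 : List (Int × Int)) (i : Int) : Bool :=
  match PySem.List.pyGet? diff2 (i + 8), PySem.List.pyGet? diff2 i with
  | some x, some y => pvPairGt x y
  | _, _ => false

-- the `if` condition of A's inner for-loop: `i + 8 in ret and diff2[i+8] > diff2[i]`
def pvQual (diff2 : List (Int × Int)) (cur : List Int) (i : Int) : Bool :=
  cur.contains (i + 8) && pvGtB diff2 i

-- the while loop: each iteration scans for the first qualifying i (the for/break) and removes it;
-- fuel = number of possible removals (each removal shortens the list, so |ret| suffices)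
def pvLoopA (diff2 : List (Int × Int)) : Nat → List Int → List Int
  | 0, cur => cur
  | fuel + 1, cur =>
    match cur.find? (pvQual diff2 cur) with
    | none => cur
    | some i =>
      match PySem.List.remove? cur i with
      | some cur' => pvLoopA diff2 fuel cur'
      | none => cur

def CalculateDiff2 (ret : List Int) (diff2 : List (Int × Int)) : List Int :=
  pvLoopA diff2 ret.length ret

-- ===== PORT B =====

-- one step of B's single pass: state = (multiplicity dict of still-present elements, output list)
def pvStepB (diff2 : List (Int × Int)) (st : PySem.Dict Int Int × List Int) (i : Int) :
    PySem.Dict Int Int × List Int :=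
  if decide ((0 : Int) < st.1.getD (i + 8) 0) && pvGtB diff2 i then
    (st.1.insert i (st.1.getD i 0 - 1), st.2)
  else
    (st.1, st.2 ++ [i])

def CalculateDiff2_alt (ret : List Int) (diff2 : List (Int × Int)) : List Int :=
  let cnt := ret.foldl (fun d i => d.insert i (d.getD i 0 + 1)) PySem.Dict.empty
  (ret.foldl (pvStepB diff2) (cnt, [])).2

-- ===== PRECONDITION & SPEC =====
-- Pre_ excludes the inputs on which Python raises IndexError: a pair i, i+8 both in ret with an
-- index outside [-len(diff2), len(diff2)).  This is slightly conservative: if such an i+8 is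
-- removed before i is ever tested, A still returns — and B then returns the same value.
def Pre_CalculateDiff2 (ret : List Int) (diff2 : List (Int × Int)) : Prop :=
  ∀ i ∈ ret, (i + 8) ∈ ret → (-(diff2.length : Int) ≤ i ∧ i + 8 < (diff2.length : Int))
instance (ret : List Int) (diff2 : List (Int × Int)) : Decidable (Pre_CalculateDiff2 ret diff2) := by
  unfold Pre_CalculateDiff2; infer_instance

def pvWitness_CalculateDiff2 : List Int × (List (Int × Int)) :=
  ([0, 8, 3], [(0, 0), (0, 0), (0, 0), (0, 0), (0, 0), (0, 0), (0, 0), (0, 0), (1, 1)])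

def Spec_CalculateDiff2 (ret : List Int) (diff2 : List (Int × Int)) (out : List Int) : Prop := out = CalculateDiff2_alt ret diff2
instance (ret : List Int) (diff2 : List (Int × Int)) (out : List Int) : Decidable (Spec_CalculateDiff2 ret diff2 out) := by unfold Spec_CalculateDiff2; infer_instance

-- ===== CLAIM (what is proved, stated in full; the proofs are below) =====
def Claim_equal_CalculateDiff2 : Prop := ∀ (ret : List Int) (diff2 : List (Int × Int)), Dom_CalculateDiff2 ret diff2 → Pre_CalculateDiff2 ret diff2 → Spec_CalculateDiff2 ret diff2 (CalculateDiff2 ret diff2)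

-- ===== LEMMAS AND PROOFS =====

-- common reference: the single pass written on plain lists (cur = the still-present elements)
def pvPass (diff2 : List (Int × Int)) : List Int → List Int → List Int
  | [], cur => cur
  | i :: s, cur =>
    if pvQual diff2 cur i then pvPass diff2 s (cur.erase i) else pvPass diff2 s cur

-- the removal condition is antitone: shrinking cur can only turn it false
theorem pvQual_mono (diff2 : List (Int × Int)) (kept s : List Int) (i j : Int)
    (h : pvQual diff2 (kept ++ i :: s) j = false) : pvQual diff2 (kept ++ s) j = false := by
  unfold pvQual at *
  cases hc : (kept ++ s).contains (j + 8) with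
  | false => simp
  | true =>
    have hm : (j + 8) ∈ kept ++ i :: s := by
      have := List.contains_iff_mem.mp hc
      simp only [List.mem_append, List.mem_cons] at this ⊢
      tauto
    rw [List.contains_iff_mem.mpr hm] at h
    simpa using h

-- A's fixpoint loop equals the single pass: the scanned prefix `kept` never re-qualifies
theorem pvLoopA_eq_pass (diff2 : List (Int × Int)) :
    ∀ (s kept cur : List Int) (fuel : Nat), cur = kept ++ s → s.length ≤ fuel →
      (∀ j ∈ kept, pvQual diff2 cur j = false) →
      pvLoopA diff2 fuel cur = pvPass diff2 s cur := by
  intro s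
  induction s with
  | nil =>
    intro kept cur fuel hcur _ hkept
    have hfind : cur.find? (pvQual diff2 cur) = none := by
      rw [List.find?_eq_none]
      intro x hx
      have hxk : x ∈ kept := by simpa [hcur] using hx
      simp [hkept x hxk]
    cases fuel with
    | zero => simp [pvLoopA, pvPass]
    | succ f => simp [pvLoopA, hfind, pvPass]
  | cons i s' ih =>
    intro kept cur fuel hcur hlen hkept
    cases fuel with
    | zero => simp at hlen
    | succ f =>
      by_cases hq : pvQual diff2 cur i = true
      · have hik : i ∉ kept := fun hik => Bool.false_ne_true ((hkept i hik) ▸ hq)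
        have h1 : kept.find? (pvQual diff2 cur) = none := by
          rw [List.find?_eq_none]; intro x hx; simp [hkept x hx]
        have hfind : cur.find? (pvQual diff2 cur) = some i := by
          rw [hcur, List.find?_append, ← hcur, h1, List.find?_cons_of_pos hq]
          rfl
        have hmem : i ∈ cur := by simp [hcur]
        have hrm : PySem.List.remove? cur i = some (cur.erase i) :=
          PySem.List.remove?_eq_some_erase cur i hmem
        have herase : cur.erase i = kept ++ s' := by
          rw [hcur, List.erase_append_right _ hik, List.erase_cons_head]
        have hkept' : ∀ j ∈ kept, pvQual diff2 (kept ++ s') j = false := fun j hj =>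
          pvQual_mono diff2 kept s' i j (hcur ▸ hkept j hj)
        have hrec := ih kept (kept ++ s') f rfl (by simp at hlen; omega) hkept'
        show pvLoopA diff2 (f + 1) cur = pvPass diff2 (i :: s') cur
        rw [pvLoopA, hfind]
        show (match PySem.List.remove? cur i with
              | some cur' => pvLoopA diff2 f cur'
              | none => cur) = pvPass diff2 (i :: s') cur
        rw [hrm]
        show pvLoopA diff2 f (cur.erase i) = pvPass diff2 (i :: s') cur
        rw [herase, hrec, pvPass, if_pos hq, herase]
      · have hq' : pvQual diff2 cur i = false := Bool.eq_false_iff.mpr hq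
        have hkept' : ∀ j ∈ kept ++ [i], pvQual diff2 cur j = false := by
          intro j hj
          rcases List.mem_append.mp hj with h | h
          · exact hkept j h
          · rcases List.mem_singleton.mp h with rfl; exact hq'
        have hrec := ih (kept ++ [i]) cur (f + 1)
          (by rw [hcur, List.append_assoc]; rfl) (by simp at hlen ⊢; omega) hkept'
        show pvLoopA diff2 (f + 1) cur = pvPass diff2 (i :: s') cur
        rw [pvPass, if_neg (by simp [hq']), hrec]

-- B's fold equals the single pass: the dict holds the multiplicities of out ++ s
theorem pvFoldB_eq_pass (diff2 : List (Int × Int)) :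
    ∀ (s out : List Int) (d : PySem.Dict Int Int),
      (∀ x : Int, d.getD x 0 = ((out ++ s).count x : Int)) →
      (∀ j ∈ out, pvQual diff2 (out ++ s) j = false) →
      (s.foldl (pvStepB diff2) (d, out)).2 = pvPass diff2 s (out ++ s) := by
  intro s
  induction s with
  | nil =>
    intro out d _ _
    simp [pvPass]
  | cons i s' ih =>
    intro out d hd hout
    have hcond : decide ((0 : Int) < d.getD (i + 8) 0) = (out ++ i :: s').contains (i + 8) := by
      rw [hd]
      cases hc : (out ++ i :: s').contains (i + 8) with
      | true =>
        have hm := List.contains_iff_mem.mp hc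
        have hp : 0 < (out ++ i :: s').count (i + 8) := List.count_pos_iff.mpr hm
        simp only [decide_eq_true_eq]
        exact_mod_cast hp
      | false =>
        have hnm : (i + 8) ∉ out ++ i :: s' := fun hm => by
          rw [List.contains_iff_mem.mpr hm] at hc; cases hc
        simp [List.count_eq_zero.mpr hnm]
    have hstep : pvStepB diff2 (d, out) i =
        if pvQual diff2 (out ++ i :: s') i then (d.insert i (d.getD i 0 - 1), out)
        else (d, out ++ [i]) := by
      rw [pvStepB, pvQual, hcond]
    by_cases hq : pvQual diff2 (out ++ i :: s') i = true
    · have hik : i ∉ out := fun hik => Bool.false_ne_true ((hout i hik) ▸ hq)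
      have herase : (out ++ i :: s').erase i = out ++ s' := by
        rw [List.erase_append_right _ hik, List.erase_cons_head]
      have hmem : i ∈ out ++ i :: s' := by simp
      have hd' : ∀ x : Int, (d.insert i (d.getD i 0 - 1)).getD x 0 = ((out ++ s').count x : Int) := by
        intro x
        rw [PySem.Dict.getD_insert]
        by_cases hx : x = i
        · subst hx
          rw [if_pos rfl, hd]
          have hpos : 0 < (out ++ x :: s').count x := List.count_pos_iff.mpr hmem
          have hcc : (out ++ s').count x + 1 = (out ++ x :: s').count x := by
            rw [← herase, List.count_erase_self]
            omega
          rw [← hcc]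
          push_cast
          ring
        · rw [if_neg hx, hd]
          have hne : (out ++ s').count x = (out ++ i :: s').count x := by
            rw [← herase, List.count_erase_of_ne hx]
          rw [hne]
      have hout' : ∀ j ∈ out, pvQual diff2 (out ++ s') j = false := fun j hj =>
        pvQual_mono diff2 out s' i j (hout j hj)
      have hrec := ih out (d.insert i (d.getD i 0 - 1)) hd' hout'
      calc ((i :: s').foldl (pvStepB diff2) (d, out)).2
          = (s'.foldl (pvStepB diff2) (d.insert i (d.getD i 0 - 1), out)).2 := by
            rw [List.foldl_cons, hstep, if_pos hq]
        _ = pvPass diff2 s' (out ++ s') := hrec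
        _ = pvPass diff2 (i :: s') (out ++ i :: s') := by
            rw [pvPass, if_pos hq, herase]
    · have hq' : pvQual diff2 (out ++ i :: s') i = false := Bool.eq_false_iff.mpr hq
      have hshape : (out ++ [i]) ++ s' = out ++ i :: s' := by
        rw [List.append_assoc]; rfl
      have hd' : ∀ x : Int, d.getD x 0 = (((out ++ [i]) ++ s').count x : Int) := by
        intro x; rw [hshape]; exact hd x
      have hout' : ∀ j ∈ out ++ [i], pvQual diff2 ((out ++ [i]) ++ s') j = false := by
        intro j hj
        rw [hshape]
        rcases List.mem_append.mp hj with h | h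
        · exact hout j h
        · rcases List.mem_singleton.mp h with rfl; exact hq'
      have hrec := ih (out ++ [i]) d hd' hout'
      rw [hshape] at hrec
      calc ((i :: s').foldl (pvStepB diff2) (d, out)).2
          = (s'.foldl (pvStepB diff2) (d, out ++ [i])).2 := by
            rw [List.foldl_cons, hstep, if_neg (by simp [hq'])]
        _ = pvPass diff2 s' (out ++ i :: s') := hrec
        _ = pvPass diff2 (i :: s') (out ++ i :: s') := by
            rw [pvPass, if_neg (by simp [hq'])]

theorem pvAlt_eq_pass (ret : List Int) (diff2 : List (Int × Int)) :
    CalculateDiff2_alt ret diff2 = pvPass diff2 ret ret := by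
  unfold CalculateDiff2_alt
  have hcnt : ∀ x : Int,
      (ret.foldl (fun d i => d.insert i (d.getD i 0 + 1)) PySem.Dict.empty).getD x 0
        = (ret.count x : Int) := by
    intro x
    rw [PySem.Dict.foldl_insert_getD_add_one_eq_counter, PySem.Dict.getD_counter]
  have := pvFoldB_eq_pass diff2 ret [] _ (by simpa using hcnt) (by simp)
  simpa using this

-- ===== VERDICT (by name: the statement is the Claim_ definition above) =====
theorem CalculateDiff2_spec : Claim_equal_CalculateDiff2 := by
  intro ret diff2 _ _
  unfold Spec_CalculateDiff2 CalculateDiff2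
  rw [pvAlt_eq_pass, pvLoopA_eq_pass diff2 ret [] ret ret.length rfl le_rfl (by simp)]
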